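-- pv_equiv track=rewrite | github.com/dune-mirrors/dune-fem | dune/source/formatter/expression.py | entangleLists
-- ===== SOURCE A (Python) =====
-- def entangleLists(lists, delimiter=''):
--     left = lists[0]
--     if len(lists) > 1:
--         right = lists[1]
--         n = len(left)
--         return entangleLists([left[:n-1] + [left[n-1] + delimiter + right[0]] + right[1:]] + lists[2:], delimiter)
--     else:
--         return left
-- ===== SOURCE B (Python) =====
-- def entangleLists(lists, delimiter=''):
--     first = lists[0]
--     if len(lists) == 1:
--         return first
--     out = first[:-1]
--     pending = first[-1]
--     for nxt in lists[1:]: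
--         merged = pending + delimiter + nxt[0]
--         if len(nxt) == 1:
--             pending = merged
--         else:
--             out.append(merged)
--             out.extend(nxt[1:-1])
--             pending = nxt[-1]
--     out.append(pending)
--     return out
-- ===== Notes on version B (the rewrite author's own statement) =====
-- stated objective: faster
-- what changed: Replaces A's recursion that rebuilds the whole accumulated list on every merge step with a single left-to-right loop that appends each segment once, carrying only the pending boundary element.
import Mathlib
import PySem

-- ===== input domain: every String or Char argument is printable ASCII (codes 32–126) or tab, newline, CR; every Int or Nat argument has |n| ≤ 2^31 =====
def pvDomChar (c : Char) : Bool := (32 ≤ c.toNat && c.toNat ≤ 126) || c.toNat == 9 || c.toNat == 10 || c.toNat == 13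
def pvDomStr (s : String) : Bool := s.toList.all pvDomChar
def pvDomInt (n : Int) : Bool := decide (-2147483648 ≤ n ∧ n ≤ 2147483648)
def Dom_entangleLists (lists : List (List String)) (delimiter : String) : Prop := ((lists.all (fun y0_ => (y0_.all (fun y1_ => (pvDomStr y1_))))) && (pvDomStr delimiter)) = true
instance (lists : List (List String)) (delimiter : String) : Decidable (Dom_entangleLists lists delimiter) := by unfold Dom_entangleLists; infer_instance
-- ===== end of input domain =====

-- B replaces A's recursion (which rebuilds the whole accumulated list each step) by one
-- left-to-right pass that appends each segment once; equal return value on Pre_.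

-- ===== PORT A =====
-- Literal port of A's recursion. Where Python raises IndexError (lists == [] for lists[0],
-- or an empty sublist reached while len(lists) > 1) the out-of-range accesses are rendered
-- with default values; Pre_entangleLists excludes exactly those inputs.
def entangleLists (lists : List (List String)) (delimiter : String) : List String :=
  match lists with
  | [] => []                                   -- Python: lists[0] raises IndexError (outside Pre_)
  | [left] => left
  | left :: right :: rest =>
      let n := left.length
      entangleLists
        ((left.take (n - 1) ++ [left.getD (n - 1) "" ++ delimiter ++ right.headD ""] ++ right.drop 1)
          :: rest) delimiter
termination_by lists.length
decreasing_by simp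

-- ===== PORT B =====
-- the loop body of Source B: out / pending accumulators, consuming lists[1:]
def entangleLoop (out : List String) (pending : String) (rest : List (List String)) (delimiter : String) : List String :=
  match rest with
  | [] => out ++ [pending]
  | nxt :: rest' =>
      let merged := pending ++ delimiter ++ nxt.headD ""
      if nxt.length == 1 then
        entangleLoop out merged rest' delimiter
      else
        entangleLoop (out ++ [merged] ++ (nxt.drop 1).dropLast) (nxt.getLastD "") rest' delimiter

def entangleLists_alt (lists : List (List String)) (delimiter : String) : List String :=
  match lists with
  | [] => []                                   -- Python: lists[0] raises IndexError (outside Pre_)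
  | first :: rest =>
      if rest.isEmpty then first
      else entangleLoop first.dropLast (first.getLastD "") rest delimiter

-- ===== PRECONDITION & SPEC =====
-- Pre_ excludes exactly the inputs where the Python A raises IndexError: the empty list of
-- lists, and any input with more than one list in which some sublist is empty.
def Pre_entangleLists (lists : List (List String)) (delimiter : String) : Prop :=
  lists ≠ [] ∧ (1 < lists.length → ∀ l ∈ lists, l ≠ [])
instance (lists : List (List String)) (delimiter : String) : Decidable (Pre_entangleLists lists delimiter) := by unfold Pre_entangleLists; infer_instance
def pvWitness_entangleLists : List (List String) × String := ([["a", "b"], ["c"], ["d", "e"]], "-")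

def Spec_entangleLists (lists : List (List String)) (delimiter : String) (out : List String) : Prop := out = entangleLists_alt lists delimiter
instance (lists : List (List String)) (delimiter : String) (out : List String) : Decidable (Spec_entangleLists lists delimiter out) := by unfold Spec_entangleLists; infer_instance

-- ===== CLAIM (what is proved, stated in full; the proofs are below) =====
def Claim_equal_entangleLists : Prop := ∀ (lists : List (List String)) (delimiter : String), Dom_entangleLists lists delimiter → Pre_entangleLists lists delimiter → Spec_entangleLists lists delimiter (entangleLists lists delimiter)

-- ===== LEMMAS AND PROOFS =====

theorem dropLast_append_getLastD {α : Type} [Inhabited α] (l : List α) (h : l ≠ []) (d : α) :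
    l.dropLast ++ [l.getLastD d] = l := by
  induction l with
  | nil => exact absurd rfl h
  | cons a t ih => cases t with
    | nil => simp
    | cons b t' => simpa using ih (by simp)

theorem take_pred_eq_dropLast {α : Type} (l : List α) :
    l.take (l.length - 1) = l.dropLast := by
  simp [List.dropLast_eq_take]

theorem getD_pred_eq_getLastD (l : List String) :
    l.getD (l.length - 1) "" = l.getLastD "" := by
  rw [List.getLastD_eq_getLast?, List.getLast?_eq_getElem?]
  simp [List.getD_eq_getElem?_getD]

theorem getLastD_append_of_ne_nil (a b : List String) (h : b ≠ []) (d : String) :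
    (a ++ b).getLastD d = b.getLastD d := by
  rw [List.getLastD_eq_getLast?, List.getLastD_eq_getLast?, List.getLast?_append_of_ne_nil _ h]

-- main invariant: on nonempty left and all-nonempty rest, A's recursion equals B's loop
theorem entangle_invariant (delimiter : String) :
    ∀ (rest : List (List String)) (left : List String), left ≠ [] →
      (∀ l ∈ rest, l ≠ []) →
      entangleLists (left :: rest) delimiter
        = entangleLoop left.dropLast (left.getLastD "") rest delimiter := by
  intro rest
  induction rest with
  | nil =>
      intro left hl _
      simp only [entangleLists, entangleLoop]
      exact (dropLast_append_getLastD left hl "").symm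
  | cons nxt rest' ih =>
      intro left hl hall
      have hn : nxt ≠ [] := hall nxt (by simp)
      have hrest : ∀ l ∈ rest', l ≠ [] := fun l hm => hall l (List.mem_cons_of_mem _ hm)
      -- A's one merge step
      have hstep : entangleLists (left :: nxt :: rest') delimiter
          = entangleLists
              ((left.dropLast ++ [left.getLastD "" ++ delimiter ++ nxt.headD ""] ++ nxt.drop 1)
                :: rest') delimiter := by
        rw [entangleLists]
        rw [take_pred_eq_dropLast, getD_pred_eq_getLastD left]
      set M : List String :=
        left.dropLast ++ [left.getLastD "" ++ delimiter ++ nxt.headD ""] ++ nxt.drop 1 with hM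
      have hMne : M ≠ [] := by simp [hM]
      rw [hstep, ih M hMne hrest]
      -- now match B's loop step
      rw [entangleLoop]
      by_cases h1 : nxt.length = 1
      · -- nxt = [x]: M = left.dropLast ++ [merged], a single-element list absorbed into pending
        obtain ⟨x, hx⟩ : ∃ x, nxt = [x] := by
          cases nxt with
          | nil => simp at h1
          | cons a t => cases t with
            | nil => exact ⟨a, rfl⟩
            | cons b t' => simp at h1
        subst hx
        simp [hM]
      · -- nxt has ≥ 2 elements: its tail becomes the new out-segment / pending
        have h2 : 1 < nxt.length := by
          have := List.length_pos_iff.mpr hn; omega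
        have htne : nxt.drop 1 ≠ [] := by
          intro h; have := congrArg List.length h; simp at this; omega
        have hbeq : (nxt.length == 1) = false := by simp [h1]
        rw [hbeq]
        simp only [Bool.false_eq_true, if_false]
        congr 1
        · -- dropLast of M
          rw [hM, List.append_assoc,
            List.dropLast_append_of_ne_nil (by
              intro h; exact htne ((List.append_eq_nil_iff.mp h).2)),
            List.dropLast_append_of_ne_nil htne]
          simp
        · -- getLastD of M
          rw [hM, getLastD_append_of_ne_nil _ _ htne]
          conv_rhs => rw [← List.take_append_drop 1 nxt]
          rw [getLastD_append_of_ne_nil _ _ htne]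

-- ===== VERDICT (by name: the statement is the Claim_ definition above) =====
theorem entangleLists_spec : Claim_equal_entangleLists := by
  intro lists delimiter _ hpre
  obtain ⟨hne, hall⟩ := hpre
  unfold Spec_entangleLists
  match lists, hne with
  | [first], _ => simp [entangleLists, entangleLists_alt]
  | first :: nxt :: rest, _ =>
      have hlen : 1 < (first :: nxt :: rest).length := by simp
      have hfirst : first ≠ [] := hall hlen first (by simp)
      have hrest : ∀ l ∈ nxt :: rest, l ≠ [] := fun l hm => hall hlen l (List.mem_cons_of_mem _ hm)
      rw [entangle_invariant delimiter (nxt :: rest) first hfirst hrest]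
      simp [entangleLists_alt]
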